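-- pv_equiv track=rewrite | github.com/walkccc/LeetCode | solutions/2445. Number of Nodes With Value One/2445.py | numberOfNodes
-- ===== SOURCE A (Python) =====
-- def numberOfNodes(n: int, queries: list[int]) -> int:
--   # flipped[i] := True if we should flip all the values in the subtree rooted
--   # at i
--   flipped = [False] * (n + 1)
--
--   for query in queries:
--     flipped[query] = flipped[query] ^ True
--
--   def dfs(label: int, value: int) -> int:
--     if label > n:
--       return 0
--     value ^= flipped[label]
--     return value + dfs(label * 2, value) + dfs(label * 2 + 1, value)
--
--   return dfs(1, 0)
-- ===== SOURCE B (Python) =====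
-- def numberOfNodes(n: int, queries: list[int]) -> int:
--   flipped = [False] * (n + 1)
--   for query in queries:
--     flipped[query] = flipped[query] ^ True
--   # forward DP over labels: parent label // 2 is already computed when we reach label
--   val = [False] * (n + 1)
--   count = 0
--   for label in range(1, n + 1):
--     v = val[label // 2] ^ flipped[label]
--     val[label] = v
--     count += v
--   return count
-- ===== Notes on version B (the rewrite author's own statement) =====
-- stated objective: simpler
-- what changed: Replaces A's top-down DFS recursion over the implicit binary tree by a single forward loop over labels 1..n computing val[label] = val[label // 2] ^ flipped[label] (each parent label is smaller, so one pass suffices) and summing as it goes.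
import Mathlib
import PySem

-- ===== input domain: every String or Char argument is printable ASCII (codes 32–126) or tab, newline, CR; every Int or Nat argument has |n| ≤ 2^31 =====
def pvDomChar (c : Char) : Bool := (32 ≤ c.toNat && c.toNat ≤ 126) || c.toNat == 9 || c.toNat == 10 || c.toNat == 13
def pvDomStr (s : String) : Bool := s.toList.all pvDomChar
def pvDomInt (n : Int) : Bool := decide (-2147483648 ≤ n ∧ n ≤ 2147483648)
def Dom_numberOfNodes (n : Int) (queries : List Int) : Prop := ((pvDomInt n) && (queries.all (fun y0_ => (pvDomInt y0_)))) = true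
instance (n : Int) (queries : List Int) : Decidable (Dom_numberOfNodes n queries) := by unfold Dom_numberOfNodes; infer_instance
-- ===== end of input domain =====

-- B replaces A's top-down DFS recursion by a single forward DP pass over labels
-- (val[label] = val[label // 2] ^ flipped[label]); objective: simpler (no recursion).

-- ===== PORT A =====
-- flipped = [False] * (n + 1); for query in queries: flipped[query] ^= True
-- (this loop appears verbatim in both Pythons, so the ports share it)
-- Python's list of booleans is modelled as Array Bool (O(1) indexing, like CPython's list).
-- flipped[q] read/write is exact Python indexing: negative q wraps by +len, out of range is a
-- no-op here (Python raises IndexError there; Pre_ excludes exactly those inputs).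
def pvFlip (n : Int) (queries : List Int) : Array Bool :=
  queries.foldl
    (fun fl q =>
      let i : Int := if q < 0 then q + (fl.size : Int) else q
      if 0 ≤ i ∧ i.toNat < fl.size then fl.setIfInBounds i.toNat (!(fl.getD i.toNat false))
      else fl)
    (Array.replicate (n + 1).toNat false)

-- A's dfs; Python's `value` (always 0 or 1) is modelled as Bool, added as 0/1.
-- `label = 0` is an unreachable totality guard (dfs is only ever called with label ≥ 1).
def pvDfs (n : Int) (fl : Array Bool) (label : Nat) (value : Bool) : Int :=
  if label = 0 then 0
  else if (label : Int) > n then 0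
  else
    -- flipped[label]: the guard gives 1 ≤ label ≤ n < fl.size, so getD is exact here
    let v := value.xor (fl.getD label false)
    (if v then (1 : Int) else 0) + pvDfs n fl (label * 2) v + pvDfs n fl (label * 2 + 1) v
termination_by (n + 1 - label).toNat
decreasing_by
  · simp only [not_lt] at *; omega
  · simp only [not_lt] at *; omega

def numberOfNodes (n : Int) (queries : List Int) : Int :=
  pvDfs n (pvFlip n queries) 1 false

-- ===== PORT B =====
-- one loop iteration: v = val[label // 2] ^ flipped[label]; val[label] = v; count += v
-- label ranges over 1..n, so label and label // 2 are nonnegative and .toNat is exact;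
-- both indices are < n + 1 = size, so getD / setIfInBounds are exact Python indexing here
def pvStep (fl : Array Bool) (s : Array Bool × Int) (label : Int) : Array Bool × Int :=
  let v := (s.1.getD (PySem.Int.floordiv label 2).toNat false).xor
           (fl.getD label.toNat false)
  (s.1.setIfInBounds label.toNat v, s.2 + (if v then (1 : Int) else 0))

def numberOfNodes_alt (n : Int) (queries : List Int) : Int :=
  let fl := pvFlip n queries
  ((PySem.List.pyRange 1 (n + 1) 1).foldl (pvStep fl)
    (Array.replicate (n + 1).toNat false, 0)).2

-- ===== PRECONDITION & SPEC =====
-- Pre_ excludes exactly the inputs on which Python A raises IndexError: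
-- some query outside [-(n+1), n] (flipped has length n+1).
def Pre_numberOfNodes (n : Int) (queries : List Int) : Prop :=
  ∀ q ∈ queries, -(n + 1) ≤ q ∧ q < n + 1

instance (n : Int) (queries : List Int) : Decidable (Pre_numberOfNodes n queries) := by
  unfold Pre_numberOfNodes; infer_instance

def pvWitness_numberOfNodes : Int × List Int := (3, [1, 3, 1])

def Spec_numberOfNodes (n : Int) (queries : List Int) (out : Int) : Prop := out = numberOfNodes_alt n queries
instance (n : Int) (queries : List Int) (out : Int) : Decidable (Spec_numberOfNodes n queries out) := by unfold Spec_numberOfNodes; infer_instance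

-- ===== CLAIM (what is proved, stated in full; the proofs are below) =====
def Claim_equal_numberOfNodes : Prop := ∀ (n : Int) (queries : List Int), Dom_numberOfNodes n queries → Pre_numberOfNodes n queries → Spec_numberOfNodes n queries (numberOfNodes n queries)

-- ===== LEMMAS AND PROOFS =====

-- parity of flips on the path from the root to label l (gpar fl 0 = false)
def gpar (fl : Array Bool) : Nat → Bool
  | 0 => false
  | l + 1 => (gpar fl ((l + 1) / 2)).xor (fl.getD (l + 1) false)
termination_by l => l
decreasing_by omega

theorem gpar_zero (fl : Array Bool) : gpar fl 0 = false := by simp [gpar]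

theorem gpar_pos (fl : Array Bool) (l : Nat) (hl : 1 ≤ l) :
    gpar fl l = (gpar fl (l / 2)).xor (fl.getD l false) := by
  cases l with
  | zero => omega
  | succ k => simp [gpar]

-- anc l m : l is an ancestor of m (inclusive) in the heap-label tree
def anc (l m : Nat) : Bool :=
  if m < l then false
  else if m = l then true
  else anc l (m / 2)
termination_by m
decreasing_by omega

theorem anc_le {l m : Nat} (h : anc l m = true) : l ≤ m := by
  by_contra hlt
  rw [anc, if_pos (by omega)] at h
  exact Bool.false_ne_true h

theorem anc_false {l m : Nat} (h : m < l) : anc l m = false := by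
  rw [anc, if_pos h]

theorem anc_self (l : Nat) : anc l l = true := by
  rw [anc]; simp

theorem anc_one {m : Nat} (hm : 1 ≤ m) : anc 1 m = true := by
  induction m using Nat.strong_induction_on with
  | _ m ih =>
    rw [anc]
    rcases Nat.eq_or_lt_of_le hm with h | h
    · simp [← h]
    · rw [if_neg (by omega), if_neg (by omega)]
      exact ih (m / 2) (by omega) (by omega)

theorem anc_split_bool (l : Nat) (hl : 1 ≤ l) (m : Nat) :
    anc l m = (decide (m = l) || anc (l * 2) m || anc (l * 2 + 1) m) := by
  induction m using Nat.strong_induction_on with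
  | _ m ih =>
    rcases Nat.lt_trichotomy m l with h | h | h
    · rw [anc_false h, anc_false (by omega), anc_false (by omega)]
      simp; omega
    · subst h
      rw [anc_self]
      simp
    · -- m > l
      have hrec : anc l m = anc l (m / 2) := by
        rw [anc, if_neg (by omega), if_neg (by omega)]
      by_cases h2 : m < l * 2
      · -- l < m < 2l: everything false
        have : anc l (m / 2) = false := anc_false (by omega)
        rw [hrec, this, anc_false (by omega), anc_false (by omega)]
        simp; omega
      · by_cases he : m = l * 2
        · subst he
          rw [hrec]
          have : l * 2 / 2 = l := by omega
          rw [this, anc_self, anc_self, anc_false (by omega)]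
          simp
        · by_cases he1 : m = l * 2 + 1
          · subst he1
            rw [hrec]
            have h12 : (l * 2 + 1) / 2 = l := by omega
            rw [h12, anc_self, anc_self]
            have : anc (l * 2) (l * 2 + 1) = anc (l * 2) l := by
              rw [anc, if_neg (by omega), if_neg (by omega), h12]
            rw [this, anc_false (by omega)]
            simp
          · -- m ≥ 2l + 2
            have hm2 : m ≥ l * 2 + 2 := by omega
            have e1 : anc (l * 2) m = anc (l * 2) (m / 2) := by
              rw [anc, if_neg (by omega), if_neg (by omega)]
            have e2 : anc (l * 2 + 1) m = anc (l * 2 + 1) (m / 2) := by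
              rw [anc, if_neg (by omega), if_neg (by omega)]
            rw [hrec, e1, e2, ih (m / 2) (by omega)]
            have : decide (m / 2 = l) = false := by simp; omega
            rw [this]
            have : decide (m = l) = false := by simp; omega
            rw [this]

theorem anc_sibling (l : Nat) (hl : 1 ≤ l) (m : Nat) :
    ¬(anc (l * 2) m = true ∧ anc (l * 2 + 1) m = true) := by
  induction m using Nat.strong_induction_on with
  | _ m ih =>
    rintro ⟨h1, h2⟩
    have hle1 := anc_le h1
    have hle2 := anc_le h2
    by_cases he : m = l * 2
    · subst he; omega
    · by_cases he1 : m = l * 2 + 1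
      · subst he1
        have : anc (l * 2) (l * 2 + 1) = anc (l * 2) l := by
          rw [anc, if_neg (by omega), if_neg (by omega)]
          congr 1; omega
        rw [this] at h1
        have := anc_le h1; omega
      · have hm2 : m ≥ l * 2 + 2 := by omega
        have e1 : anc (l * 2) m = anc (l * 2) (m / 2) := by
          rw [anc, if_neg (by omega), if_neg (by omega)]
        have e2 : anc (l * 2 + 1) m = anc (l * 2 + 1) (m / 2) := by
          rw [anc, if_neg (by omega), if_neg (by omega)]
        exact ih (m / 2) (by omega) ⟨e1 ▸ h1, e2 ▸ h2⟩

-- the pointwise three-way split of the ancestor indicator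
theorem anc_split_ite (l : Nat) (hl : 1 ≤ l) (m : Nat) (x : Int) :
    (if anc l m then x else 0) =
      (if m = l then x else 0) + (if anc (l * 2) m then x else 0) +
        (if anc (l * 2 + 1) m then x else 0) := by
  have hs := anc_split_bool l hl m
  have hd := anc_sibling l hl m
  by_cases h1 : m = l
  · have e1 : anc (l * 2) m = false := by
      cases hb : anc (l * 2) m
      · rfl
      · have := anc_le hb; omega
    have e2 : anc (l * 2 + 1) m = false := by
      cases hb : anc (l * 2 + 1) m
      · rfl
      · have := anc_le hb; omega
    rw [hs, e1, e2]
    simp [h1]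
  · cases hb1 : anc (l * 2) m
    · cases hb2 : anc (l * 2 + 1) m
      · rw [hs, hb1, hb2]; simp [h1]
      · rw [hs, hb1, hb2]; simp [h1]
    · cases hb2 : anc (l * 2 + 1) m
      · rw [hs, hb1, hb2]; simp [h1]
      · exact absurd ⟨hb1, hb2⟩ hd

theorem sum_ite_single {l : Nat} (f : Nat → Int) :
    ∀ (xs : List Nat), xs.Nodup → l ∈ xs →
      (xs.map (fun m => if m = l then f m else 0)).sum = f l := by
  intro xs
  induction xs with
  | nil => intro _ h; cases h
  | cons a t ih =>
    intro hnd hmem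
    simp only [List.map_cons, List.sum_cons]
    rcases List.mem_cons.1 hmem with rfl | hmem'
    · rw [if_pos rfl]
      have : (t.map (fun m => if m = l then f m else 0)).sum = 0 := by
        apply List.sum_eq_zero
        intro x hx
        rcases List.mem_map.1 hx with ⟨m, hm, rfl⟩
        rw [if_neg]; intro h; subst h
        exact (List.nodup_cons.1 hnd).1 hm
      rw [this]; ring
    · rw [if_neg, ih (List.nodup_cons.1 hnd).2 hmem']
      · ring
      · intro h; subst h; exact (List.nodup_cons.1 hnd).1 hmem'

theorem sum_map_add3 (xs : List Nat) (f g h : Nat → Int) :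
    (xs.map (fun m => f m + g m + h m)).sum =
      (xs.map f).sum + (xs.map g).sum + (xs.map h).sum := by
  induction xs with
  | nil => simp
  | cons a t ih => simp [ih]; ring

-- A's dfs computes the sum of path parities over the subtree of `l` clipped to [1, n]
theorem dfs_eq (n : Int) (fl : Array Bool) (l : Nat) (hl : 1 ≤ l) :
    pvDfs n fl l (gpar fl (l / 2)) =
      ((List.range' 1 n.toNat).map
        (fun m => if anc l m then (if gpar fl m then (1 : Int) else 0) else 0)).sum := by
  generalize hfuel : (n + 1 - (l : Int)).toNat = fuel
  induction fuel using Nat.strong_induction_on generalizing l with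
  | _ fuel ih =>
  by_cases hgt : (l : Int) > n
  · rw [pvDfs, if_neg (by omega), if_pos hgt]
    symm
    apply List.sum_eq_zero
    intro x hx
    rcases List.mem_map.1 hx with ⟨m, hm, rfl⟩
    have hmn : m < n.toNat + 1 := by
      have := List.mem_range'.1 hm; omega
    have : anc l m = false := anc_false (by omega)
    rw [this]; simp
  · have hln : (l : Int) ≤ n := by omega
    rw [pvDfs, if_neg (by omega), if_neg (by omega)]
    have hv : (gpar fl (l / 2)).xor (fl.getD l false) = gpar fl l :=
      (gpar_pos fl l hl).symm
    simp only [hv]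
    have h2 : (l * 2) / 2 = l := by omega
    have h3 : (l * 2 + 1) / 2 = l := by omega
    subst hfuel
    have ih2 := ih ((n + 1 - ((l * 2 : Nat) : Int)).toNat) (by push_cast; omega) (l * 2)
      (by omega) rfl
    have ih3 := ih ((n + 1 - ((l * 2 + 1 : Nat) : Int)).toNat) (by push_cast; omega)
      (l * 2 + 1) (by omega) rfl
    rw [h2] at ih2
    rw [h3] at ih3
    rw [ih2, ih3]
    have hsplit :
        ((List.range' 1 n.toNat).map
          (fun m => if anc l m then (if gpar fl m then (1 : Int) else 0) else 0)).sum =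
        ((List.range' 1 n.toNat).map
          (fun m => if m = l then (if gpar fl m then (1 : Int) else 0) else 0)).sum +
        ((List.range' 1 n.toNat).map
          (fun m => if anc (l * 2) m then (if gpar fl m then (1 : Int) else 0) else 0)).sum +
        ((List.range' 1 n.toNat).map
          (fun m => if anc (l * 2 + 1) m then (if gpar fl m then (1 : Int) else 0) else 0)).sum := by
      rw [← sum_map_add3]
      congr 1
      apply List.map_congr_left
      intro m _
      exact anc_split_ite l hl m _
    rw [hsplit]
    have hsingle :
        ((List.range' 1 n.toNat).map
          (fun m => if m = l then (if gpar fl m then (1 : Int) else 0) else 0)).sum =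
          (if gpar fl l then (1 : Int) else 0) := by
      apply sum_ite_single
      · exact List.nodup_range'
      · exact List.mem_range'.2 ⟨l - 1, by omega, by omega⟩
    rw [hsingle]

-- B's loop invariant
theorem b_inv (fl : Array Bool) (N : Nat) (k : Nat) (hk : k ≤ N) :
    (PySem.List.pyRange 1 ((k : Int) + 1) 1).foldl (pvStep fl)
        (Array.replicate (N + 1) false, 0) =
      (((List.range (N + 1)).map (fun i => if i ≤ k then gpar fl i else false)).toArray,
       ((List.range' 1 k).map (fun m => if gpar fl m then (1 : Int) else 0)).sum) := by
  induction k with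
  | zero =>
    rw [PySem.List.pyRange_one_eq_nil (by omega)]
    simp only [List.foldl_nil, List.range'_zero, List.map_nil, List.sum_nil]
    rw [Prod.mk.injEq]
    refine ⟨?_, rfl⟩
    · apply Array.ext
      · simp
      · intro i h1 h2
        simp only [Array.getElem_replicate, List.getElem_toArray, List.getElem_map,
          List.getElem_range]
        by_cases hi : i ≤ 0
        · have : i = 0 := by omega
          subst this
          rw [if_pos (by omega), gpar_zero]
        · rw [if_neg hi]
  | succ k ihk =>
    have hk' : k ≤ N := by omega
    have hsr : PySem.List.pyRange 1 ((k : Int) + 1 + 1) 1 =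
        PySem.List.pyRange 1 ((k : Int) + 1) 1 ++ [(k : Int) + 1] := by
      exact PySem.List.pyRange_one_succ_right (show (1 : Int) ≤ (k : Int) + 1 by omega)
    have : ((k + 1 : Nat) : Int) + 1 = (k : Int) + 1 + 1 := by push_cast; ring
    rw [this, hsr, List.foldl_append, ihk hk']
    simp only [List.foldl_cons, List.foldl_nil]
    -- unfold one step
    rw [pvStep]
    have hfd : PySem.Int.floordiv ((k : Int) + 1) 2 = (((k + 1) / 2 : Nat) : Int) := by
      have h : ((k : Int) + 1) = (((k + 1 : Nat) : Int)) := by push_cast; ring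
      rw [h]
      exact_mod_cast PySem.Int.floordiv_natCast (k + 1) 2
    have hread : (((List.range (N + 1)).map
          (fun i => if i ≤ k then gpar fl i else false)).toArray).getD
        (PySem.Int.floordiv ((k : Int) + 1) 2).toNat false = gpar fl ((k + 1) / 2) := by
      rw [hfd]
      have htn : (((k + 1) / 2 : Nat) : Int).toNat = (k + 1) / 2 := by omega
      rw [htn]
      have hlt : (k + 1) / 2 < N + 1 := by omega
      rw [Array.getD_eq_getD_getElem?]
      rw [Array.getElem?_eq_getElem (by simpa using hlt)]
      simp only [List.getElem_toArray, List.getElem_map, List.getElem_range,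
        Option.getD_some]
      rw [if_pos (by omega)]
    rw [hread]
    have hvv : (gpar fl ((k + 1) / 2)).xor
        (fl.getD ((k : Int) + 1).toNat false) = gpar fl (k + 1) := by
      have h := gpar_pos fl (k + 1) (by omega)
      have hc : ((k : Int) + 1).toNat = k + 1 := by omega
      rw [h, hc]
    rw [hvv]
    rw [Prod.mk.injEq]
    refine ⟨?_, ?_⟩
    · have htn : ((k : Int) + 1).toNat = k + 1 := by omega
      rw [htn]
      have hset : ∀ (xs : List Bool) (v : Bool),
          (xs.toArray).setIfInBounds (k + 1) v = (xs.set (k + 1) v).toArray := by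
        intro xs v; simp
      rw [hset]
      congr 1
      apply List.ext_getElem
      · simp
      · intro i h1 h2
        simp only [List.length_set, List.length_map, List.length_range] at h1 h2
        rw [List.getElem_set]
        simp only [List.getElem_map, List.getElem_range]
        by_cases hik : i = k + 1
        · subst hik
          rw [if_pos rfl, if_pos (by omega)]
        · rw [if_neg (fun h => hik h.symm)]
          by_cases hle : i ≤ k
          · rw [if_pos hle, if_pos (by omega)]
          · rw [if_neg hle, if_neg (by omega)]
    · rw [List.range'_concat, show 1 + 1 * k = k + 1 from by omega]
      simp only [List.map_append, List.sum_append, List.map_cons, List.map_nil,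
        List.sum_cons, List.sum_nil]
      simp

-- ===== VERDICT (by name: the statement is the Claim_ definition above) =====
theorem numberOfNodes_spec : Claim_equal_numberOfNodes := by
  intro n queries _ _
  unfold Spec_numberOfNodes numberOfNodes numberOfNodes_alt
  set fl := pvFlip n queries with hfl
  have hA : pvDfs n fl 1 false =
      ((List.range' 1 n.toNat).map
        (fun m => if anc 1 m then (if gpar fl m then (1 : Int) else 0) else 0)).sum := by
    have := dfs_eq n fl 1 (by omega)
    simpa [gpar_zero] using this
  have hAnc : ((List.range' 1 n.toNat).map
        (fun m => if anc 1 m then (if gpar fl m then (1 : Int) else 0) else 0)).sum =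
      ((List.range' 1 n.toNat).map (fun m => if gpar fl m then (1 : Int) else 0)).sum := by
    congr 1
    apply List.map_congr_left
    intro m hm
    have hm1 : 1 ≤ m := by have := List.mem_range'.1 hm; omega
    rw [anc_one hm1, if_pos rfl]
  rw [hA, hAnc]
  by_cases hn : 0 ≤ n
  · have hB := b_inv fl n.toNat n.toNat (le_refl _)
    rw [show ((n.toNat : Int) + 1) = n + 1 by omega,
        show n.toNat + 1 = (n + 1).toNat by omega] at hB
    exact (congrArg Prod.snd hB).symm
  · -- n < 0: both sides are 0
    have h1 : n.toNat = 0 := by omega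
    have hB : PySem.List.pyRange 1 (n + 1) 1 = [] :=
      PySem.List.pyRange_one_eq_nil (by omega)
    show _ = ((PySem.List.pyRange 1 (n + 1) 1).foldl (pvStep fl)
      (Array.replicate (n + 1).toNat false, 0)).2
    rw [h1, hB]
    simp
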